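-- pv_equiv track=rewrite | github.com/drizztSun/common_project | PythonLeetcode/Leetcode/1649_CreateSortedArrayThroughInstructions.py | dpit_bit
-- ===== SOURCE A (Python) =====
-- def dpit_bit(instructions: list) -> int:
--     # implement Binary Index Tree
--     def update(index, value, bit, m):
--         index += 1
--         while index < m:
--             bit[index] += value
--             index += index & -index
--
--     def query(index, bit):
--         index += 1
--         result = 0
--         while index >= 1:
--             result += bit[index]
--             index -= index & -index
--         return result
--
--     MOD = 10 ** 9 + 7
--     m = max(instructions) + 2
--     bit = [0] * m
--     cost = 0
--
--     n = len(instructions)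
--     for i in range(n):
--         left_cost = query(instructions[i] - 1, bit)
--         right_cost = i - query(instructions[i], bit)
--         cost += min(left_cost, right_cost)
--         update(instructions[i], 1, bit, m)
--     return cost % MOD
-- ===== SOURCE B (Python) =====
-- def dpit_bit(instructions: list) -> int:
--     # maintain an actual sorted list instead of a Fenwick tree:
--     # binary-search for how many previous values are < x and how many are > x
--     MOD = 10 ** 9 + 7
--     s = []
--     cost = 0
--     for x in instructions:
--         lo = _bisect_left(s, x)
--         hi = _bisect_right(s, x)
--         cost += min(lo, len(s) - hi)
--         s.insert(hi, x)
--     return cost % MOD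
--
--
-- def _bisect_left(s, x):
--     lo, hi = 0, len(s)
--     while lo < hi:
--         mid = (lo + hi) // 2
--         if s[mid] < x:
--             lo = mid + 1
--         else:
--             hi = mid
--     return lo
--
--
-- def _bisect_right(s, x):
--     lo, hi = 0, len(s)
--     while lo < hi:
--         mid = (lo + hi) // 2
--         if x < s[mid]:
--             hi = mid
--         else:
--             lo = mid + 1
--     return lo
-- ===== Notes on version B (the rewrite author's own statement) =====
-- stated objective: simpler
-- what changed: Replaces the hand-rolled Fenwick (binary indexed) tree and its bit-twiddling update/query loops by an explicitly maintained sorted list with two hand-written binary searches (bisect_left/bisect_right) and positional insert, summing min(#smaller, #greater) directly.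
import Mathlib
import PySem

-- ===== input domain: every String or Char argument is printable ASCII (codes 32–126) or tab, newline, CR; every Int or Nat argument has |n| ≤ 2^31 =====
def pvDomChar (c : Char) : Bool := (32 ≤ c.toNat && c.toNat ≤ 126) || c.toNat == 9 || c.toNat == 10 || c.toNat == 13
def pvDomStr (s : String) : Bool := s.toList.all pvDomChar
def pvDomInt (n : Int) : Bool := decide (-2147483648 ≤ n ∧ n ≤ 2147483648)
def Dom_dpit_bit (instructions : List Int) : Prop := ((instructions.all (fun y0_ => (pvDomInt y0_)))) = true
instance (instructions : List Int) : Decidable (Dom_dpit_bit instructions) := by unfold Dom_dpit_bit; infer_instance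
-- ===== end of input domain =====

-- B replaces A's Fenwick (binary indexed) tree by an explicitly maintained sorted list
-- with two hand-written binary searches; objective: simpler (not faster).


-- ===== PORT A =====
-- `while index < m: bit[index] += value; index += index & -index` — fuel-bounded loop;
-- under Pre_ the index starts ≥ 1 and strictly grows, so the given fuel always suffices.
-- `bit[index]` is in range (1 ≤ index < m = len(bit)) so plain set/getD indexing is exact.
def pvUpdateLoop (m value : Int) : ℕ → Int → List Int → List Int
  | 0, _, bit => bit
  | fuel+1, index, bit =>
    if index < m then
      pvUpdateLoop m value fuel (index + PySem.Int.band index (-index))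
        (bit.set index.toNat (bit.getD index.toNat 0 + value))
    else bit

def pvUpdate (index value : Int) (bit : List Int) (m : Int) : List Int :=
  pvUpdateLoop m value ((m - (index + 1)).toNat + 1) (index + 1) bit

-- `while index >= 1: result += bit[index]; index -= index & -index` — fuel-bounded;
-- under Pre_ the index strictly decreases, so the given fuel always suffices.
def pvQueryLoop : ℕ → Int → List Int → Int → Int
  | 0, _, _, result => result
  | fuel+1, index, bit, result =>
    if 1 ≤ index then
      pvQueryLoop fuel (index - PySem.Int.band index (-index)) bit
        (result + bit.getD index.toNat 0)
    else result

def pvQuery (index : Int) (bit : List Int) : Int :=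
  pvQueryLoop ((index + 1).toNat + 1) (index + 1) bit 0

-- `for i in range(n): ...` over instructions[i] with loop counter i
def pvALoop (m : Int) : List Int → Int → List Int → Int → Int
  | [], _, _, cost => cost
  | x :: rest, i, bit, cost =>
    pvALoop m rest (i + 1) (pvUpdate x 1 bit m)
      (cost + min (pvQuery (x - 1) bit) (i - pvQuery x bit))

def dpit_bit (instructions : List Int) : Int :=
  match PySem.List.max? instructions (fun y => y) with
  | none => 0  -- Python raises ValueError here (max of empty list); outside Pre_
  | some mx =>
    let m := mx + 2
    PySem.Int.mod (pvALoop m instructions 0 (List.replicate m.toNat 0) 0) (10^9 + 7)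

-- ===== PORT B =====
-- hand-written bisect_left: `while lo < hi: mid = (lo+hi)//2; ...`
-- (lo, hi, mid are the same nonnegative values as in Python; s[mid] is in range, getD is exact)
def pvBlLoop (s : List Int) (x : Int) (lo hi : ℕ) : ℕ :=
  if lo < hi then
    let mid := (lo + hi) / 2
    if s.getD mid 0 < x then pvBlLoop s x (mid + 1) hi else pvBlLoop s x lo mid
  else lo
termination_by hi - lo
decreasing_by all_goals omega

def pvBl (s : List Int) (x : Int) : ℕ := pvBlLoop s x 0 s.length

-- hand-written bisect_right
def pvBrLoop (s : List Int) (x : Int) (lo hi : ℕ) : ℕ :=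
  if lo < hi then
    let mid := (lo + hi) / 2
    if x < s.getD mid 0 then pvBrLoop s x lo mid else pvBrLoop s x (mid + 1) hi
  else lo
termination_by hi - lo
decreasing_by all_goals omega

def pvBr (s : List Int) (x : Int) : ℕ := pvBrLoop s x 0 s.length

def pvBLoop : List Int → List Int → Int → Int
  | [], _, cost => cost
  | x :: rest, s, cost =>
    let lo := pvBl s x
    let hi := pvBr s x
    pvBLoop rest (PySem.List.insert s (hi : Int) x)
      (cost + min (lo : Int) ((s.length : Int) - (hi : Int)))

def dpit_bit_alt (instructions : List Int) : Int :=
  PySem.Int.mod (pvBLoop instructions [] 0) (10^9 + 7)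

-- ===== PRECONDITION & SPEC =====
-- Pre_ excludes the empty list (A's max() raises ValueError) and lists containing a negative
-- value (A's BIT update loop then never terminates, or indexes out of the bit array).
def Pre_dpit_bit (instructions : List Int) : Prop :=
  instructions ≠ [] ∧ ∀ x ∈ instructions, 0 ≤ x
instance (instructions : List Int) : Decidable (Pre_dpit_bit instructions) := by
  unfold Pre_dpit_bit; infer_instance
def pvWitness_dpit_bit : List Int := [1, 3, 3, 2]

def Spec_dpit_bit (instructions : List Int) (out : Int) : Prop := out = dpit_bit_alt instructions
instance (instructions : List Int) (out : Int) : Decidable (Spec_dpit_bit instructions out) := by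
  unfold Spec_dpit_bit; infer_instance

-- ===== CLAIM (what is proved, stated in full; the proofs are below) =====
def Claim_equal_dpit_bit : Prop := ∀ (instructions : List Int), Dom_dpit_bit instructions → Pre_dpit_bit instructions → Spec_dpit_bit instructions (dpit_bit instructions)

-- ===== LEMMAS AND PROOFS =====
def pvLow (n : ℕ) : ℕ := n - (n &&& (n-1))

theorem pvLand1 (n : ℕ) : (2*n+1) &&& (2*n) = 2*n := by
  apply Nat.eq_of_testBit_eq
  intro k
  rw [Nat.testBit_land]
  cases k with
  | zero => simp [Nat.testBit_zero]
  | succ k =>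
    have h1 : (2*n+1)/2 = n := by omega
    have h2 : (2*n)/2 = n := by omega
    simp only [Nat.testBit_succ, h1, h2, Bool.and_self]

theorem pvLand2 (n : ℕ) (h : 1 ≤ n) : (2*n) &&& (2*n-1) = 2*(n &&& (n-1)) := by
  apply Nat.eq_of_testBit_eq
  intro k
  rw [Nat.testBit_land]
  cases k with
  | zero => simp [Nat.testBit_zero]
  | succ k =>
    have h1 : (2*n)/2 = n := by omega
    have h2 : (2*n-1)/2 = n-1 := by omega
    have h3 : (2*(n &&& (n-1)))/2 = n &&& (n-1) := by omega
    simp only [Nat.testBit_succ, h1, h2, h3, Nat.testBit_land]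

theorem pvLow_odd (m : ℕ) : pvLow (2*m+1) = 1 := by
  unfold pvLow
  have : 2*m+1-1 = 2*m := by omega
  rw [this, pvLand1]
  omega

theorem pvLow_even (m : ℕ) (h : 1 ≤ m) : pvLow (2*m) = 2 * pvLow m := by
  unfold pvLow
  rw [pvLand2 m h]
  have hle : m &&& (m-1) ≤ m := Nat.and_le_left
  omega

theorem pvLow_core : ∀ n : ℕ, 1 ≤ n → ∃ k, pvLow n = 2^k ∧ 2^k ∣ n ∧ ¬ (2^(k+1) ∣ n) := by
  intro n
  induction n using Nat.strong_induction_on with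
  | _ n ih =>
    intro hn
    rcases Nat.even_or_odd n with he | ho
    · obtain ⟨m, hm⟩ := he
      have hm' : n = 2*m := by omega
      have hm1 : 1 ≤ m := by omega
      obtain ⟨k, hk1, hk2, hk3⟩ := ih m (by omega) hm1
      refine ⟨k+1, ?_, ?_, ?_⟩
      · rw [hm', pvLow_even m hm1, hk1]; ring
      · obtain ⟨c, hc⟩ := hk2
        exact ⟨c, by rw [hm', hc]; ring⟩
      · intro hd
        obtain ⟨c, hc⟩ := hd
        have hh : (2:ℕ)^(k+1+1)*c = 2*(2^(k+1)*c) := by ring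
        exact hk3 ⟨c, by omega⟩
    · obtain ⟨m, hm⟩ := ho
      refine ⟨0, ?_, ?_, ?_⟩
      · rw [hm, show 2*m+1 = 2*m+1 from rfl, pvLow_odd]; rfl
      · exact one_dvd n
      · intro hd
        rw [hm] at hd
        omega

theorem pvPow_lt {a b : ℕ} (h : a < b) : (2:ℕ)^a < 2^b := Nat.pow_lt_pow_right (by norm_num) h
theorem pvPow_le {a b : ℕ} (h : a ≤ b) : (2:ℕ)^a ≤ 2^b := Nat.pow_le_pow_right (by norm_num) h

theorem pvLow_pos (n : ℕ) (h : 1 ≤ n) : 1 ≤ pvLow n := by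
  obtain ⟨k, h1, _, _⟩ := pvLow_core n h
  rw [h1]; exact Nat.one_le_two_pow

theorem pvLow_le (n : ℕ) : pvLow n ≤ n := Nat.sub_le _ _

theorem pvLow_dvd (n : ℕ) (h : 1 ≤ n) : pvLow n ∣ n := by
  obtain ⟨k, h1, h2, _⟩ := pvLow_core n h
  rw [h1]; exact h2

theorem pvLow_uniq (n k : ℕ) (h : 1 ≤ n) (h1 : 2^k ∣ n) (h2 : ¬ 2^(k+1) ∣ n) :
    pvLow n = 2^k := by
  obtain ⟨j, e, d1, d2⟩ := pvLow_core n h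
  rcases lt_trichotomy j k with hl | he | hg
  · exact absurd (dvd_trans (pow_dvd_pow 2 (by omega)) h1) d2
  · rw [e, he]
  · exact absurd (dvd_trans (pow_dvd_pow 2 (by omega)) d1) h2

theorem pvLow_W (n k : ℕ) (h : 1 ≤ n) (hd : 2^k ∣ n) : 2^k ∣ pvLow n := by
  obtain ⟨j, e, d1, d2⟩ := pvLow_core n h
  have hkj : k ≤ j := by
    by_contra hh
    exact d2 (dvd_trans (pow_dvd_pow 2 (by omega)) hd)
  rw [e]; exact pow_dvd_pow 2 hkj

theorem pvLow_sub_dvd (n : ℕ) (h : 1 ≤ n) : 2 * pvLow n ∣ n - pvLow n := by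
  obtain ⟨k, e, d1, d2⟩ := pvLow_core n h
  obtain ⟨q, hq⟩ := d1
  have hqodd : q % 2 = 1 := by
    rcases Nat.even_or_odd q with hqe | hqo
    · obtain ⟨t, ht⟩ := hqe
      exfalso; apply d2
      refine ⟨t, ?_⟩
      rw [hq, ht, pow_succ]; ring
    · exact Nat.odd_iff.mp hqo
  obtain ⟨t, ht⟩ := Nat.odd_iff.mpr hqodd
  rw [ht] at hq
  refine ⟨t, ?_⟩
  rw [e]
  have h2 : (2:ℕ)^k*(2*t+1) = 2*(2^k*t) + 2^k := by ring
  have h3 : 2*2^k*t = 2*(2^k*t) := by ring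
  omega

theorem pvLow_VA (x y : ℕ) (hy : 1 ≤ y) (hd : 2 * pvLow y ∣ x) : pvLow (x + y) = pvLow y := by
  obtain ⟨k, e, d1, d2⟩ := pvLow_core y hy
  rw [e] at hd
  have h2 : (2:ℕ)*2^k = 2^(k+1) := by ring
  rw [h2] at hd
  rw [e]
  apply pvLow_uniq (x+y) k (by omega)
  · exact dvd_add (dvd_trans (pow_dvd_pow 2 (by omega)) hd) d1
  · intro hc
    apply d2
    have hsub := Nat.dvd_sub hc hd
    have he : x + y - x = y := by omega
    rwa [he] at hsub

theorem pvDvd_add_le (g d m : ℕ) (hg : 1 ≤ g) (h1 : g ∣ d) (h2 : g ∣ m) (h3 : d < m) :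
    d + g ≤ m := by
  have := Nat.le_of_dvd (by omega) (Nat.dvd_sub h2 h1)
  omega

theorem pvL3 (p i : ℕ) (hp : 1 ≤ p) (hi : 1 ≤ i) :
    (i - pvLow i < p + pvLow p ∧ p + pvLow p ≤ i) ↔ (i - pvLow i < p ∧ p ≤ i ∧ i ≠ p) := by
  obtain ⟨kp, ep, dp1, dp2⟩ := pvLow_core p hp
  have hpp : 1 ≤ pvLow p := pvLow_pos p hp
  constructor
  · rintro ⟨h1, h2⟩
    refine ⟨?_, by omega, by omega⟩
    by_contra hc
    push_neg at hc
    obtain ⟨ki, ei, di1, di2⟩ := pvLow_core i hi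
    have hG : 2 * pvLow i ∣ i - pvLow i := pvLow_sub_dvd i hi
    have hLi_le : pvLow i ≤ i := pvLow_le i
    have h2G : (2:ℕ)^(ki+1) ∣ i - pvLow i := by
      have h22 : (2:ℕ)^(ki+1) = 2 * pvLow i := by rw [ei]; ring
      rw [h22]; exact hG
    by_cases hd0 : i - pvLow i = p
    · have h2i : (2:ℕ)^(ki+1) ∣ p := hd0 ▸ h2G
      have hkk : ki + 1 ≤ kp := by
        by_contra hkk
        exact dp2 (dvd_trans (pow_dvd_pow 2 (by omega)) h2i)
      have hlt : pvLow i < pvLow p := by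
        rw [ei, ep]; exact pvPow_lt (by omega)
      have e1 : i = p + pvLow i := by omega
      omega
    · have hd1 : p < i - pvLow i := by omega
      have hd : 1 ≤ i - pvLow i - p := by omega
      have hdlt : i - pvLow i - p < pvLow p := by omega
      obtain ⟨kd, edd, dd1, dd2⟩ := pvLow_core (i - pvLow i - p) hd
      have hkd_lt : kd < kp := by
        by_contra hh
        push_neg at hh
        have hle2 : (2:ℕ)^kp ≤ 2^kd := pvPow_le hh
        have hled : (2:ℕ)^kd ≤ i - pvLow i - p := Nat.le_of_dvd (by omega) dd1
        rw [ep] at hdlt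
        omega
      have hdp : 2 * pvLow (i - pvLow i - p) ∣ p := by
        rw [edd]
        have h22 : (2:ℕ)*2^kd = 2^(kd+1) := by ring
        rw [h22]
        have hstep : (2:ℕ)^(kd+1) ∣ 2^kp := pow_dvd_pow 2 (by omega)
        exact dvd_trans hstep (ep ▸ dp1)
      have hjd : pvLow (i - pvLow i) = pvLow (i - pvLow i - p) := by
        have hVA := pvLow_VA p (i - pvLow i - p) hd hdp
        have hjpd : p + (i - pvLow i - p) = i - pvLow i := by omega
        rwa [hjpd] at hVA
      have hW : (2:ℕ)^(ki+1) ∣ pvLow (i - pvLow i) :=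
        pvLow_W (i - pvLow i) (ki+1) (by omega) h2G
      rw [hjd, edd] at hW
      have hki_kd : ki + 1 ≤ kd := by
        by_contra hh
        push_neg at hh
        have hle1 := Nat.le_of_dvd (Nat.lt_of_lt_of_le Nat.zero_lt_one Nat.one_le_two_pow) hW
        have hlt1 : (2:ℕ)^kd < 2^(ki+1) := pvPow_lt (by omega)
        omega
      have hdsum : (i - pvLow i - p) + pvLow (i - pvLow i - p) ≤ pvLow p := by
        refine pvDvd_add_le (pvLow (i - pvLow i - p)) (i - pvLow i - p) (pvLow p)
          (pvLow_pos _ hd) (pvLow_dvd _ hd) ?_ hdlt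
        rw [edd, ep]; exact pow_dvd_pow 2 (by omega)
      have hLi_lt : pvLow i < pvLow (i - pvLow i - p) := by
        rw [edd, ei]; exact pvPow_lt (by omega)
      omega
  · rintro ⟨h1, h2, h3⟩
    have hpi : p < i := by omega
    refine ⟨by omega, ?_⟩
    by_contra hc
    push_neg at hc
    have hr1 : 1 ≤ i - p := by omega
    have hrlt : i - p < pvLow p := by omega
    obtain ⟨kr, er, dr1, dr2⟩ := pvLow_core (i - p) hr1
    have hkr : kr < kp := by
      by_contra hh
      push_neg at hh
      have hle2 : (2:ℕ)^kr ≤ i - p := Nat.le_of_dvd (by omega) dr1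
      have hle3 : (2:ℕ)^kp ≤ 2^kr := pvPow_le hh
      rw [ep] at hrlt
      omega
    have hdp : 2 * pvLow (i - p) ∣ p := by
      rw [er]
      have h22 : (2:ℕ)*2^kr = 2^(kr+1) := by ring
      rw [h22]
      have hstep : (2:ℕ)^(kr+1) ∣ 2^kp := pow_dvd_pow 2 (by omega)
      exact dvd_trans hstep (ep ▸ dp1)
    have hir : pvLow i = pvLow (i - p) := by
      have hVA := pvLow_VA p (i - p) hr1 hdp
      have hip : p + (i - p) = i := by omega
      rwa [hip] at hVA
    have hrl := pvLow_le (i - p)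
    omega

-- ===== bridges and loop lemmas =====

theorem pvBand_eq (n : ℕ) (h : 1 ≤ n) :
    PySem.Int.band (n : Int) (-(n : Int)) = ((pvLow n : ℕ) : Int) := by
  have h1 : (0:Int) ≤ (n:Int) := by omega
  have h2 : ¬ ((0:Int) ≤ -(n:Int)) := by omega
  simp only [PySem.Int.band, if_pos h1, if_neg h2, pvLow]
  have e1 : ((n:Int)).toNat = n := by omega
  have e2 : (-(-(n:Int)) - 1).toNat = n - 1 := by omega
  rw [e1, e2]

theorem pvGetD_set (l : List Int) (i j : ℕ) (a : Int) :
    (l.set i a).getD j 0 = if i = j ∧ i < l.length then a else l.getD j 0 := by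
  rw [List.getD_eq_getElem?_getD, List.getD_eq_getElem?_getD, List.getElem?_set]
  split_ifs with hij hlen hc hc hc
  · rfl
  · exact absurd ⟨hij, hlen⟩ hc
  · exact absurd hc.2 hlen
  · subst hij
    rw [List.getElem?_eq_none (by omega)]
  · exact absurd hc.1 hij
  · rfl

def pvCnt (P : List Int) (t : Int) : ℕ := P.countP (fun y => decide (y < t))

def pvInv (bit P : List Int) (M : ℕ) : Prop :=
  bit.length = M ∧ ∀ i : ℕ, 1 ≤ i → i < M →
    bit.getD i 0 = ((pvCnt P (i : Int) : ℕ) : Int) - ((pvCnt P ((i - pvLow i : ℕ) : Int) : ℕ) : Int)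

theorem pvCnt_zero (P : List Int) (hP : ∀ y ∈ P, 0 ≤ y) : pvCnt P 0 = 0 := by
  unfold pvCnt
  rw [List.countP_eq_zero]
  intro y hy
  simpa using hP y hy

theorem pvCnt_append (P : List Int) (x t : Int) :
    pvCnt (P ++ [x]) t = pvCnt P t + (if x < t then 1 else 0) := by
  unfold pvCnt
  rw [List.countP_append]
  simp [List.countP_cons]

theorem pvQueryLoop_eq (M : ℕ) (bit P : List Int) (hInv : pvInv bit P M)
    (hP : ∀ y ∈ P, 0 ≤ y) :
    ∀ (fuel n : ℕ) (acc : Int), n < M → n < fuel →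
      pvQueryLoop fuel (n : Int) bit acc = acc + pvCnt P (n : Int) := by
  intro fuel
  induction fuel with
  | zero => intro n acc _ h; omega
  | succ f ih =>
    intro n acc hnM hnf
    by_cases hn : 1 ≤ n
    · have hcond : (1:Int) ≤ (n:Int) := by omega
      simp only [pvQueryLoop, if_pos hcond]
      rw [pvBand_eq n hn]
      have hle := pvLow_le n
      have hpos := pvLow_pos n hn
      have hcast : (n:Int) - ((pvLow n : ℕ) : Int) = ((n - pvLow n : ℕ) : Int) := by omega
      rw [hcast]
      have htn : ((n:Int)).toNat = n := by omega
      rw [htn]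
      rw [ih (n - pvLow n) _ (by omega) (by omega)]
      have hbit := hInv.2 n hn hnM
      rw [hbit]
      omega
    · have : n = 0 := by omega
      subst this
      simp only [pvQueryLoop, Nat.cast_zero]
      rw [if_neg (by omega)]
      rw [pvCnt_zero P hP]
      omega

theorem pvQuery_eq (M : ℕ) (bit P : List Int) (hInv : pvInv bit P M)
    (hP : ∀ y ∈ P, 0 ≤ y) (n : ℕ) (hn : n < M) :
    pvQuery ((n : Int) - 1) bit = pvCnt P (n : Int) := by
  unfold pvQuery
  have e1 : (n:Int) - 1 + 1 = (n:Int) := by omega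
  rw [e1]
  have e2 : ((n:Int)).toNat = n := by omega
  rw [e2]
  have := pvQueryLoop_eq M bit P hInv hP (n+1) n 0 hn (by omega)
  omega

theorem pvUpdateLoop_length (m v : Int) :
    ∀ (fuel : ℕ) (idx : Int) (bit : List Int),
      (pvUpdateLoop m v fuel idx bit).length = bit.length := by
  intro fuel
  induction fuel with
  | zero => intro idx bit; rfl
  | succ f ih =>
    intro idx bit
    simp only [pvUpdateLoop]
    split_ifs
    · rw [ih]; simp
    · rfl

theorem pvUpdateLoop_getD (M : ℕ) (v : Int) :
    ∀ (fuel p : ℕ) (bit : List Int), bit.length = M → 1 ≤ p → M - p < fuel →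
      ∀ i : ℕ, i < M →
        (pvUpdateLoop (M : Int) v fuel (p : Int) bit).getD i 0
          = bit.getD i 0 + (if i - pvLow i < p ∧ p ≤ i then v else 0) := by
  intro fuel
  induction fuel with
  | zero => intro p bit _ _ h; omega
  | succ f ih =>
    intro p bit hlen hp hfuel i hiM
    by_cases hpM : p < M
    · have hcond : (p:Int) < (M:Int) := by omega
      simp only [pvUpdateLoop, if_pos hcond]
      rw [pvBand_eq p hp]
      have hppos := pvLow_pos p hp
      have hcast : (p:Int) + ((pvLow p : ℕ) : Int) = ((p + pvLow p : ℕ) : Int) := by omega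
      rw [hcast]
      have htp : ((p:Int)).toNat = p := by omega
      rw [htp]
      have hlen' : (bit.set p (bit.getD p 0 + v)).length = M := by simp [hlen]
      rw [ih (p + pvLow p) _ hlen' (by omega) (by omega) i hiM]
      rw [pvGetD_set]
      by_cases hip : i = p
      · subst hip
        rw [if_pos ⟨rfl, by omega⟩]
        rw [if_neg (by omega)]
        rw [if_pos ⟨by omega, le_refl i⟩]
        ring
      · rw [if_neg (by intro hc; exact hip hc.1.symm)]
        by_cases hi1 : 1 ≤ i
        · have h3 := pvL3 p i hp hi1
          by_cases hin : i - pvLow i < p ∧ p ≤ i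
          · rw [if_pos (h3.mpr ⟨hin.1, hin.2, hip⟩), if_pos hin]
          · rw [if_neg (by intro hc; exact hin (by have := h3.mp hc; exact ⟨this.1, this.2.1⟩)), if_neg hin]
        · have : i = 0 := by omega
          subst this
          rw [if_neg (by omega), if_neg (by omega)]
    · simp only [pvUpdateLoop]
      rw [if_neg (by omega)]
      rw [if_neg (by omega)]
      ring

theorem pvInv_update (M : ℕ) (bit P : List Int) (x : Int) (hx : 0 ≤ x)
    (hxM : x + 2 ≤ (M : Int)) (hInv : pvInv bit P M) :
    pvInv (pvUpdate x 1 bit (M : Int)) (P ++ [x]) M := by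
  unfold pvUpdate
  set p : ℕ := x.toNat + 1 with hp
  have hpI : ((p : ℕ) : Int) = x + 1 := by omega
  have hfuel : ((M:Int) - (x + 1)).toNat + 1 > M - p := by omega
  constructor
  · rw [pvUpdateLoop_length]; exact hInv.1
  · intro i h1 h2
    rw [← hpI]
    rw [pvUpdateLoop_getD M 1 _ p bit hInv.1 (by omega) (by omega) i h2]
    rw [hInv.2 i h1 h2]
    have hle := pvLow_le i
    have hpos := pvLow_pos i h1
    rw [pvCnt_append, pvCnt_append]
    have hxi : x < (i:Int) ↔ p ≤ i := by omega
    have hxj : x < ((i - pvLow i : ℕ) : Int) ↔ p ≤ i - pvLow i := by omega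
    by_cases hc : i - pvLow i < p ∧ p ≤ i
    · rw [if_pos hc]
      rw [if_pos (hxi.mpr hc.2)]
      rw [if_neg (by rw [hxj]; omega)]
      push_cast
      ring
    · rw [if_neg hc]
      by_cases hpi : p ≤ i
      · have hji : p ≤ i - pvLow i := by omega
        rw [if_pos (hxi.mpr hpi), if_pos (hxj.mpr hji)]
        push_cast
        ring
      · rw [if_neg (by rw [hxi]; exact hpi), if_neg (by rw [hxj]; omega)]
        push_cast
        ring

-- ===== B side: binary search on a sorted list =====

theorem pvCountP_of_split (s : List Int) (q : Int → Bool) (c : ℕ) (hc : c ≤ s.length)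
    (h1 : ∀ (k : ℕ) (hk : k < s.length), k < c → q (s.get ⟨k, hk⟩))
    (h2 : ∀ (k : ℕ) (hk : k < s.length), c ≤ k → ¬ q (s.get ⟨k, hk⟩)) :
    s.countP q = c := by
  conv_lhs => rw [← List.take_append_drop c s]
  rw [List.countP_append]
  have ht : (s.take c).countP q = (s.take c).length := by
    rw [List.countP_eq_length]
    intro a ha
    obtain ⟨j, hj, he⟩ := List.mem_iff_getElem.mp ha
    rw [List.getElem_take] at he
    have hjc : j < c := by simp at hj; omega
    have hjs : j < s.length := by simp at hj; omega
    subst he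
    exact h1 j hjs hjc
  have hd : (s.drop c).countP q = 0 := by
    rw [List.countP_eq_zero]
    intro a ha
    obtain ⟨j, hj, he⟩ := List.mem_iff_getElem.mp ha
    rw [List.getElem_drop] at he
    have hjs : c + j < s.length := by simp at hj; omega
    subst he
    exact h2 (c + j) hjs (by omega)
  rw [ht, hd, List.length_take]
  omega

theorem pvBlLoop_eq (s : List Int) (x : Int) (hs : s.Pairwise (· ≤ ·)) :
    ∀ (d lo hi : ℕ), hi - lo ≤ d → lo ≤ hi → hi ≤ s.length →
      (∀ (k : ℕ) (hk : k < s.length), k < lo → s.get ⟨k, hk⟩ < x) →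
      (∀ (k : ℕ) (hk : k < s.length), hi ≤ k → ¬ s.get ⟨k, hk⟩ < x) →
      pvBlLoop s x lo hi = s.countP (fun y => decide (y < x)) := by
  have hmono := List.pairwise_iff_get.mp hs
  intro d
  induction d with
  | zero =>
    intro lo hi hd hlh hhs h1 h2
    have : lo = hi := by omega
    subst this
    rw [pvBlLoop, if_neg (by omega)]
    exact (pvCountP_of_split s _ lo (by omega) (fun k hk hkl => by simpa using h1 k hk hkl)
      (fun k hk hkl => by simpa using h2 k hk hkl)).symm
  | succ d ih =>
    intro lo hi hd hlh hhs h1 h2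
    by_cases hlt : lo < hi
    · rw [pvBlLoop, if_pos hlt]
      simp only
      set mid := (lo + hi) / 2 with hmid
      have hmlt : mid < hi := by omega
      have hms : mid < s.length := by omega
      have hgd : s.getD mid 0 = s.get ⟨mid, hms⟩ := by
        rw [List.getD_eq_getElem?_getD, List.getElem?_eq_getElem hms]
        rfl
      rw [hgd]
      by_cases hv : s.get ⟨mid, hms⟩ < x
      · rw [if_pos hv]
        apply ih (mid+1) hi (by omega) (by omega) hhs
        · intro k hk hkm
          rcases Nat.lt_or_ge k mid with h | h
          · exact lt_of_le_of_lt (hmono ⟨k, hk⟩ ⟨mid, hms⟩ h) hv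
          · have : k = mid := by omega
            subst this
            exact hv
        · exact h2
      · rw [if_neg hv]
        apply ih lo mid (by omega) (by omega) (by omega) h1
        intro k hk hkm
        rcases Nat.lt_or_ge mid k with h | h
        · intro hc
          exact hv (lt_of_le_of_lt (hmono ⟨mid, hms⟩ ⟨k, hk⟩ h) hc)
        · have : k = mid := by omega
          subst this
          exact hv
    · have : lo = hi := by omega
      subst this
      rw [pvBlLoop, if_neg (by omega)]
      exact (pvCountP_of_split s _ lo (by omega) (fun k hk hkl => by simpa using h1 k hk hkl)
        (fun k hk hkl => by simpa using h2 k hk hkl)).symm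

theorem pvBrLoop_eq (s : List Int) (x : Int) (hs : s.Pairwise (· ≤ ·)) :
    ∀ (d lo hi : ℕ), hi - lo ≤ d → lo ≤ hi → hi ≤ s.length →
      (∀ (k : ℕ) (hk : k < s.length), k < lo → s.get ⟨k, hk⟩ ≤ x) →
      (∀ (k : ℕ) (hk : k < s.length), hi ≤ k → ¬ s.get ⟨k, hk⟩ ≤ x) →
      pvBrLoop s x lo hi = s.countP (fun y => decide (y ≤ x)) := by
  have hmono := List.pairwise_iff_get.mp hs
  intro d
  induction d with
  | zero =>
    intro lo hi hd hlh hhs h1 h2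
    have : lo = hi := by omega
    subst this
    rw [pvBrLoop, if_neg (by omega)]
    exact (pvCountP_of_split s _ lo (by omega) (fun k hk hkl => by simpa using h1 k hk hkl)
      (fun k hk hkl => by simpa using h2 k hk hkl)).symm
  | succ d ih =>
    intro lo hi hd hlh hhs h1 h2
    by_cases hlt : lo < hi
    · rw [pvBrLoop, if_pos hlt]
      simp only
      set mid := (lo + hi) / 2 with hmid
      have hmlt : mid < hi := by omega
      have hms : mid < s.length := by omega
      have hgd : s.getD mid 0 = s.get ⟨mid, hms⟩ := by
        rw [List.getD_eq_getElem?_getD, List.getElem?_eq_getElem hms]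
        rfl
      rw [hgd]
      by_cases hv : x < s.get ⟨mid, hms⟩
      · rw [if_pos hv]
        apply ih lo mid (by omega) (by omega) (by omega) h1
        intro k hk hkm
        rcases Nat.lt_or_ge mid k with h | h
        · intro hc
          exact absurd (lt_of_lt_of_le hv (hmono ⟨mid, hms⟩ ⟨k, hk⟩ h)) (by omega)
        · have : k = mid := by omega
          subst this
          omega
      · rw [if_neg hv]
        apply ih (mid+1) hi (by omega) (by omega) hhs
        · intro k hk hkm
          rcases Nat.lt_or_ge k mid with h | h
          · exact le_trans (hmono ⟨k, hk⟩ ⟨mid, hms⟩ h) (by omega)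
          · have : k = mid := by omega
            subst this
            omega
        · exact h2
    · have : lo = hi := by omega
      subst this
      rw [pvBrLoop, if_neg (by omega)]
      exact (pvCountP_of_split s _ lo (by omega) (fun k hk hkl => by simpa using h1 k hk hkl)
        (fun k hk hkl => by simpa using h2 k hk hkl)).symm

theorem pvBl_eq (s : List Int) (x : Int) (hs : s.Pairwise (· ≤ ·)) :
    pvBl s x = s.countP (fun y => decide (y < x)) := by
  exact pvBlLoop_eq s x hs s.length 0 s.length (by omega) (by omega) (le_refl _)
    (fun k hk h => by omega) (fun k hk h => by omega)

theorem pvBr_eq (s : List Int) (x : Int) (hs : s.Pairwise (· ≤ ·)) :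
    pvBr s x = s.countP (fun y => decide (y ≤ x)) := by
  exact pvBrLoop_eq s x hs s.length 0 s.length (by omega) (by omega) (le_refl _)
    (fun k hk h => by omega) (fun k hk h => by omega)

theorem pvInsert_bridge (s : List Int) (n : ℕ) (x : Int) (h : n ≤ s.length) :
    PySem.List.insert s (n : Int) x = s.take n ++ x :: s.drop n := by
  simp [PySem.List.insert, PySem.List.sliceIndices]
  have he : (if (n:Int) < 0 then max ((n:Int) + s.length) 0 else min (n:Int) s.length).toNat = n := by
    rw [if_neg (by omega)]
    omega
  rw [he]

theorem pvSorted_countP_le (s : List Int) (x : Int) (hs : s.Pairwise (· ≤ ·)) :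
    s.countP (fun y => decide (y ≤ x)) = (s.takeWhile (fun y => decide (y ≤ x))).length := by
  induction s with
  | nil => rfl
  | cons a t ih =>
    rw [List.pairwise_cons] at hs
    by_cases ha : a ≤ x
    · rw [List.countP_cons, List.takeWhile_cons]
      simp only [ha, decide_true, if_pos]
      rw [ih hs.2]
      simp
    · have h0 : List.countP (fun y => decide (y ≤ x)) t = 0 :=
        List.countP_eq_zero.mpr (fun y hy => by
          simp only [decide_eq_true_eq]
          have := hs.1 y hy
          omega)
      rw [List.countP_cons, List.takeWhile_cons]
      simp [ha, h0]

theorem pvSorted_dropWhile_gt (s : List Int) (x : Int) (hs : s.Pairwise (· ≤ ·)) :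
    ∀ y ∈ s.dropWhile (fun y => decide (y ≤ x)), x < y := by
  induction s with
  | nil => intro y hy; simp at hy
  | cons a t ih =>
    rw [List.pairwise_cons] at hs
    intro y hy
    rw [List.dropWhile_cons] at hy
    by_cases ha : a ≤ x
    · simp only [ha, decide_true, if_pos] at hy
      exact ih hs.2 y hy
    · simp only [ha, decide_false, Bool.false_eq_true, if_false] at hy
      rcases List.mem_cons.mp hy with h | h
      · omega
      · have := hs.1 y h
        omega

theorem pvSorted_insert (s : List Int) (x : Int) (hs : s.Pairwise (· ≤ ·)) :
    (s.take (s.countP (fun y => decide (y ≤ x))) ++ x :: s.drop (s.countP (fun y => decide (y ≤ x)))).Pairwise (· ≤ ·)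
      ∧ (s.take (s.countP (fun y => decide (y ≤ x))) ++ x :: s.drop (s.countP (fun y => decide (y ≤ x)))).Perm (x :: s) := by
  set c := s.countP (fun y => decide (y ≤ x)) with hc
  have hcl : c = (s.takeWhile (fun y => decide (y ≤ x))).length := pvSorted_countP_le s x hs
  have htake : s.take c = s.takeWhile (fun y => decide (y ≤ x)) := by
    conv_lhs => rw [← List.takeWhile_append_dropWhile (p := fun y => decide (y ≤ x)) (l := s)]
    rw [hcl, List.take_left]
  have hdrop : s.drop c = s.dropWhile (fun y => decide (y ≤ x)) := by
    conv_lhs => rw [← List.takeWhile_append_dropWhile (p := fun y => decide (y ≤ x)) (l := s)]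
    rw [hcl, List.drop_left]
  constructor
  · rw [List.pairwise_append]
    refine ⟨?_, ?_, ?_⟩
    · exact hs.sublist (List.take_sublist c s)
    · rw [List.pairwise_cons]
      constructor
      · intro y hy
        rw [hdrop] at hy
        exact le_of_lt (pvSorted_dropWhile_gt s x hs y hy)
      · exact hs.sublist (List.drop_sublist c s)
    · intro a ha b hb
      have hax : a ≤ x := by
        rw [htake] at ha
        simpa using List.mem_takeWhile_imp ha
      rcases List.mem_cons.mp hb with h | h
      · omega
      · rw [hdrop] at h
        have := pvSorted_dropWhile_gt s x hs b h
        omega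
  · have hp : (s.take c ++ x :: s.drop c).Perm (x :: (s.take c ++ s.drop c)) :=
      List.perm_middle
    rwa [List.take_append_drop] at hp

-- ===== the two main loops compute the same cost =====

theorem pvLoop_eq (M : ℕ) :
    ∀ (rest P s bit : List Int) (cost : Int),
      pvInv bit P M → (∀ y ∈ P, 0 ≤ y) → s.Pairwise (· ≤ ·) → s.Perm P →
      (∀ x ∈ rest, 0 ≤ x ∧ x + 2 ≤ (M : Int)) →
      pvALoop (M : Int) rest ((P.length : ℕ) : Int) bit cost = pvBLoop rest s cost := by
  intro rest
  induction rest with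
  | nil => intro P s bit cost _ _ _ _ _; rfl
  | cons x rest ih =>
    intro P s bit cost hInv hP hsort hperm hdom
    obtain ⟨hx0, hxM⟩ := hdom x List.mem_cons_self
    simp only [pvALoop, pvBLoop]
    -- the per-element costs agree
    have hxn : ((x.toNat : ℕ) : Int) = x := by omega
    have hq1 : pvQuery (x - 1) bit = pvCnt P x := by
      have := pvQuery_eq M bit P hInv hP x.toNat (by omega)
      rw [hxn] at this
      exact this
    have hq2 : pvQuery x bit = pvCnt P (x + 1) := by
      have := pvQuery_eq M bit P hInv hP (x.toNat + 1) (by omega)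
      have e : ((x.toNat + 1 : ℕ) : Int) = x + 1 := by omega
      rw [e] at this
      have e2 : x + 1 - 1 = x := by ring
      rw [e2] at this
      exact this
    have hbl : (pvBl s x : Int) = pvCnt P x := by
      rw [pvBl_eq s x hsort, hperm.countP_eq]
      rfl
    have hbr : (pvBr s x : ℕ) = s.countP (fun y => decide (y ≤ x)) := pvBr_eq s x hsort
    have hbr' : (pvBr s x : Int) = pvCnt P (x + 1) := by
      rw [hbr, hperm.countP_eq]
      unfold pvCnt
      congr 1
      apply List.countP_congr
      intro a _
      simp only [decide_eq_true_eq]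
      constructor <;> (intro; omega)
    have hlen : (s.length : Int) = (P.length : Int) := by
      rw [hperm.length_eq]
    have hmin : min ((pvBl s x : ℕ) : Int) ((s.length : Int) - ((pvBr s x : ℕ) : Int))
        = min (pvQuery (x - 1) bit) ((P.length : Int) - pvQuery x bit) := by
      rw [hq1, hq2, hbl, hbr', hlen]
    rw [hmin]
    -- the inserted list is sorted and a permutation of P ++ [x]
    have hhc : pvBr s x ≤ s.length := by
      rw [hbr]
      exact List.countP_le_length
    have hins : PySem.List.insert s ((pvBr s x : ℕ) : Int) x
        = s.take (s.countP (fun y => decide (y ≤ x))) ++ x :: s.drop (s.countP (fun y => decide (y ≤ x))) := by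
      rw [pvInsert_bridge s (pvBr s x) x hhc, hbr]
    obtain ⟨hsort', hperm'⟩ := pvSorted_insert s x hsort
    have hperm'' : (PySem.List.insert s ((pvBr s x : ℕ) : Int) x).Perm (P ++ [x]) := by
      rw [hins]
      exact hperm'.trans ((hperm.cons x).trans (List.perm_append_singleton x P).symm)
    have hlen' : ((P ++ [x]).length : Int) = (P.length : Int) + 1 := by
      simp
    have := ih (P ++ [x]) (PySem.List.insert s ((pvBr s x : ℕ) : Int) x)
      (pvUpdate x 1 bit (M : Int)) (cost + min (pvQuery (x - 1) bit) (((P.length : ℕ) : Int) - pvQuery x bit))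
      (pvInv_update M bit P x hx0 hxM hInv)
      (by intro y hy
          rcases List.mem_append.mp hy with h | h
          · exact hP y h
          · simp at h; omega)
      (hins ▸ hsort') hperm''
      (fun y hy => hdom y (List.mem_cons_of_mem x hy))
    rw [hlen'] at this
    exact this


-- ===== VERDICT (by name: the statement is the Claim_ definition above) =====
theorem dpit_bit_spec : Claim_equal_dpit_bit := by
  intro l _hDom hPre
  unfold Spec_dpit_bit
  obtain ⟨hne, hnn⟩ := hPre
  obtain ⟨mx, hmx⟩ : ∃ mx, PySem.List.max? l (fun y => y) = some mx := by
    rcases h : PySem.List.max? l (fun y => y) with _ | mx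
    · exact absurd ((PySem.List.max?_eq_none_iff l _).mp h) hne
    · exact ⟨mx, rfl⟩
  have hmx0 : 0 ≤ mx := hnn mx (PySem.List.max?_mem hmx)
  have hmax : ∀ y ∈ l, y ≤ mx := PySem.List.max?_isMax hmx
  set M : ℕ := (mx + 2).toNat with hM
  have hMI : ((M : ℕ) : Int) = mx + 2 := by omega
  have hInv0 : pvInv (List.replicate M 0) [] M := by
    constructor
    · simp
    · intro i h1 h2
      rw [List.getD_eq_getElem?_getD, List.getElem?_replicate, if_pos h2]
      simp [pvCnt]
  have hloop := pvLoop_eq M l [] [] (List.replicate M 0) 0 hInv0 (by simp)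
    (by simp) (by simp) (fun x hx => ⟨hnn x hx, by have := hmax x hx; omega⟩)
  simp only [List.length_nil, Nat.cast_zero] at hloop
  unfold dpit_bit dpit_bit_alt
  rw [hmx]
  simp only
  rw [show mx + 2 = ((M : ℕ) : Int) by omega]
  rw [show (((M : ℕ) : Int)).toNat = M by omega]
  rw [hloop]
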